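-- pv_equiv track=rewrite | github.com/Axionis47/ai-transformation-agent | rag/vector_store.py | _filter_by_industry
-- ===== SOURCE A (Python) =====
-- _ADJACENT_INDUSTRIES: dict[str, set[str]] = {
--     "logistics": {"manufacturing", "construction"},
--     "manufacturing": {"logistics", "construction", "energy"},
--     "healthcare": set(),
--     "financial_services": {"insurance"},
--     "insurance": {"financial_services"},
--     "retail": {"ecommerce"},
--     "ecommerce": {"retail"},
--     "professional_services": {"real_estate"},
--     "real_estate": {"professional_services"},
--     "construction": {"manufacturing", "logistics"},
--     "energy": {"manufacturing"},
-- }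
--
-- def _filter_by_industry(records: list[dict], industry: str, k: int) -> list[dict]:
--     """Return k records filtered to match industry, padded with remainder if needed."""
--     adjacent = _ADJACENT_INDUSTRIES.get(industry, set())
--     priority: list[dict] = []
--     fallback: list[dict] = []
--     for rec in records:
--         rec_industry = rec.get("industry", "").lower()
--         if rec_industry == industry:
--             priority.append(rec)
--         elif rec_industry in adjacent:
--             priority.append(rec)
--         else:
--             fallback.append(rec)
--     combined = priority + fallback
--     return combined[:k]
-- ===== SOURCE B (Python) =====
-- _ADJACENT_INDUSTRIES: dict[str, set[str]] = {
--     "logistics": {"manufacturing", "construction"},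
--     "manufacturing": {"logistics", "construction", "energy"},
--     "healthcare": set(),
--     "financial_services": {"insurance"},
--     "insurance": {"financial_services"},
--     "retail": {"ecommerce"},
--     "ecommerce": {"retail"},
--     "professional_services": {"real_estate"},
--     "real_estate": {"professional_services"},
--     "construction": {"manufacturing", "logistics"},
--     "energy": {"manufacturing"},
-- }
--
-- def _filter_by_industry(records: list[dict], industry: str, k: int) -> list[dict]:
--     """Stable sort by a binary priority key instead of an explicit two-list partition."""
--     adjacent = _ADJACENT_INDUSTRIES.get(industry, set())
--     def key(rec):
--         ri = rec.get("industry", "").lower()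
--         return 0 if ri == industry or ri in adjacent else 1
--     return sorted(records, key=key)[:k]
-- ===== Notes on version B (the rewrite author's own statement) =====
-- stated objective: idiomatic
-- what changed: Replaces the explicit two-accumulator partition loop with a single stable sort on a binary priority key followed by a slice; stability of sorted() preserves the original order within each group.
import Mathlib
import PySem

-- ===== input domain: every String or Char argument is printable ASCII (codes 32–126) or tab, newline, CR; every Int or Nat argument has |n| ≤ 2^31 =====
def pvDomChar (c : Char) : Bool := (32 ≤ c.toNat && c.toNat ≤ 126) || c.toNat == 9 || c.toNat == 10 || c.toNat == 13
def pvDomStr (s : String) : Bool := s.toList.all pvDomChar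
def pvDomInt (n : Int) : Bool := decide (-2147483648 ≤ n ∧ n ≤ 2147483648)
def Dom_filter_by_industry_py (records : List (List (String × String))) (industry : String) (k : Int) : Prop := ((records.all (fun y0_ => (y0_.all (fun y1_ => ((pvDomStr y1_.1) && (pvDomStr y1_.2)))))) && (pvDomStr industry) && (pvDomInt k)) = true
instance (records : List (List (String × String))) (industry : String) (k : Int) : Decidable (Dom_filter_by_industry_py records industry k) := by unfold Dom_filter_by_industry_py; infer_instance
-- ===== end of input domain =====

-- B replaces A's explicit two-list partition loop by one stable sort on a binary
-- priority key followed by the same [:k] slice (objective: idiomatic; not faster).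

-- ===== PORT A =====
-- the module-level _ADJACENT_INDUSTRIES table (Python set values as distinct-element lists)
def pvAdjTable : List (String × List String) := [
  ("logistics", ["manufacturing", "construction"]),
  ("manufacturing", ["logistics", "construction", "energy"]),
  ("healthcare", []),
  ("financial_services", ["insurance"]),
  ("insurance", ["financial_services"]),
  ("retail", ["ecommerce"]),
  ("ecommerce", ["retail"]),
  ("professional_services", ["real_estate"]),
  ("real_estate", ["professional_services"]),
  ("construction", ["manufacturing", "logistics"]),
  ("energy", ["manufacturing"])]

-- rec.get(key, default) / _ADJACENT_INDUSTRIES.get(industry, set()): first-match lookup in the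
-- association list (exact for Python dicts, whose keys are unique)
def pvGetD (d : List (String × String)) (key dflt : String) : String :=
  match d.find? (fun kv => kv.1 == key) with
  | some kv => kv.2
  | none => dflt

def pvAdjGet (industry : String) : List String :=
  match pvAdjTable.find? (fun kv => kv.1 == industry) with
  | some kv => kv.2
  | none => []

def filter_by_industry_py (records : List (List (String × String))) (industry : String) (k : Int) : List (List (String × String)) :=
  let adjacent := pvAdjGet industry
  let st := records.foldl
    (fun (acc : List (List (String × String)) × List (List (String × String))) rec =>
      let recIndustry := PySem.Str.lower (pvGetD rec "industry" "")
      if recIndustry == industry then (acc.1 ++ [rec], acc.2)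
      else if adjacent.contains recIndustry then (acc.1 ++ [rec], acc.2)
      else (acc.1, acc.2 ++ [rec])) ([], [])
  let combined := st.1 ++ st.2
  PySem.List.slice combined none (some k)

-- ===== PORT B =====
-- key(rec): 0 when the (lowercased) record industry matches or is adjacent, else 1
def pvKeyB (adjacent : List String) (industry : String) (rec : List (String × String)) : Int :=
  let ri := PySem.Str.lower (pvGetD rec "industry" "")
  if ri == industry || adjacent.contains ri then 0 else 1

def filter_by_industry_py_alt (records : List (List (String × String))) (industry : String) (k : Int) : List (List (String × String)) :=
  let adjacent := pvAdjGet industry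
  PySem.List.slice (PySem.List.sorted records (pvKeyB adjacent industry) false) none (some k)

-- ===== PRECONDITION & SPEC =====
def Spec_filter_by_industry_py (records : List (List (String × String))) (industry : String) (k : Int) (out : List (List (String × String))) : Prop := out = filter_by_industry_py_alt records industry k
instance (records : List (List (String × String))) (industry : String) (k : Int) (out : List (List (String × String))) : Decidable (Spec_filter_by_industry_py records industry k out) := by unfold Spec_filter_by_industry_py; infer_instance

-- ===== CLAIM (what is proved, stated in full; the proofs are below) =====
def Claim_equal_filter_by_industry_py : Prop := ∀ (records : List (List (String × String))) (industry : String) (k : Int), Dom_filter_by_industry_py records industry k → Spec_filter_by_industry_py records industry k (filter_by_industry_py records industry k)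

-- ===== LEMMAS AND PROOFS =====

-- A's partition loop computes (filter, filter of the negation), appended to the accumulators.
theorem foldl_partition {α : Type} (c1 c2 : α → Bool) :
    ∀ (xs P F : List α),
      xs.foldl (fun (acc : List α × List α) x =>
        if c1 x then (acc.1 ++ [x], acc.2)
        else if c2 x then (acc.1 ++ [x], acc.2)
        else (acc.1, acc.2 ++ [x])) (P, F)
      = (P ++ xs.filter (fun x => c1 x || c2 x), F ++ xs.filter (fun x => !(c1 x || c2 x))) := by
  intro xs
  induction xs with
  | nil => intro P F; simp
  | cons x xs ih =>
    intro P F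
    by_cases h1 : c1 x = true
    · simpa [List.foldl_cons, h1] using ih (P ++ [x]) F
    · by_cases h2 : c2 x = true
      · simpa [List.foldl_cons, h1, h2] using ih (P ++ [x]) F
      · simpa [List.foldl_cons, h1, h2] using ih P (F ++ [x])

theorem insertBy_append_of_not_before {α : Type} (before : α → α → Bool) (x : α) :
    ∀ (P F : List α), (∀ a ∈ P, before x a = false) →
      PySem.List.insertBy before x (P ++ F) = P ++ PySem.List.insertBy before x F := by
  intro P
  induction P with
  | nil => intro F _; simp
  | cons p ps ih =>
    intro F h
    have hp : before x p = false := h p (by simp)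
    simp [PySem.List.insertBy, hp, ih F (fun a ha => h a (by simp [ha]))]

-- stable insertion sort with a {0,1}-valued key is exactly the stable partition
theorem foldl_insertBy_binary {α : Type} (p : α → Bool) :
    ∀ (xs P F : List α), (∀ a ∈ P, p a = true) → (∀ a ∈ F, p a = false) →
      xs.foldl (fun acc x =>
          PySem.List.insertBy
            (fun a b => decide ((if p a then (0:Int) else 1) < (if p b then (0:Int) else 1))) x acc)
        (P ++ F)
      = (P ++ xs.filter p) ++ (F ++ xs.filter (fun x => !p x)) := by
  intro xs
  induction xs with
  | nil => intro P F _ _; simp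
  | cons x xs ih =>
    intro P F hP hF
    by_cases hx : p x = true
    · have hskip : PySem.List.insertBy
          (fun a b => decide ((if p a then (0:Int) else 1) < (if p b then (0:Int) else 1))) x (P ++ F)
          = P ++ PySem.List.insertBy
            (fun a b => decide ((if p a then (0:Int) else 1) < (if p b then (0:Int) else 1))) x F := by
        apply insertBy_append_of_not_before
        intro a ha
        simp [hx, hP a ha]
      have hins : PySem.List.insertBy
          (fun a b => decide ((if p a then (0:Int) else 1) < (if p b then (0:Int) else 1))) x F
          = x :: F := by
        cases F with
        | nil => simp [PySem.List.insertBy]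
        | cons f fs =>
          have hf : p f = false := hF f (by simp)
          simp [PySem.List.insertBy, hx, hf]
      have := ih (P ++ [x]) F
        (by intro a ha; rcases List.mem_append.mp ha with h | h
            · exact hP a h
            · simp at h; subst h; exact hx) hF
      simp only [List.foldl_cons, hskip, hins]
      have hPx : P ++ x :: F = (P ++ [x]) ++ F := by simp
      rw [hPx, this]
      simp [hx, List.append_assoc]
    · have hend : PySem.List.insertBy
          (fun a b => decide ((if p a then (0:Int) else 1) < (if p b then (0:Int) else 1))) x (P ++ F)
          = (P ++ F) ++ [x] := by
        have : ∀ a ∈ P ++ F,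
            (decide ((if p x then (0:Int) else 1) < (if p a then (0:Int) else 1))) = false := by
          intro a _
          by_cases hpa : p a = true <;> simp [hx, hpa]
        have h0 := insertBy_append_of_not_before
          (fun a b => decide ((if p a then (0:Int) else 1) < (if p b then (0:Int) else 1)))
          x (P ++ F) [] this
        simpa [PySem.List.insertBy] using h0
      have := ih P (F ++ [x]) hP
        (by intro a ha; rcases List.mem_append.mp ha with h | h
            · exact hF a h
            · simp at h; subst h; simpa using hx)
      simp only [List.foldl_cons, hend]
      rw [List.append_assoc] at this ⊢
      rw [this]
      simp [hx, List.append_assoc]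

theorem sorted_binary {α : Type} (p : α → Bool) (xs : List α) :
    PySem.List.sorted xs (fun x => if p x then (0:Int) else 1) false
      = xs.filter p ++ xs.filter (fun x => !p x) := by
  rw [PySem.List.sorted_eq_foldl_insertBy]
  simpa using foldl_insertBy_binary p xs [] []
    (by intro a ha; simp at ha) (by intro a ha; simp at ha)

-- ===== VERDICT (by name: the statement is the Claim_ definition above) =====
theorem filter_by_industry_py_spec : Claim_equal_filter_by_industry_py := by
  intro records industry k _
  show PySem.List.slice
      ((records.foldl
          (fun (acc : List (List (String × String)) × List (List (String × String))) rec =>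
            if PySem.Str.lower (pvGetD rec "industry" "") == industry then (acc.1 ++ [rec], acc.2)
            else if (pvAdjGet industry).contains (PySem.Str.lower (pvGetD rec "industry" "")) then (acc.1 ++ [rec], acc.2)
            else (acc.1, acc.2 ++ [rec])) ([], [])).1 ++
       (records.foldl
          (fun (acc : List (List (String × String)) × List (List (String × String))) rec =>
            if PySem.Str.lower (pvGetD rec "industry" "") == industry then (acc.1 ++ [rec], acc.2)
            else if (pvAdjGet industry).contains (PySem.Str.lower (pvGetD rec "industry" "")) then (acc.1 ++ [rec], acc.2)
            else (acc.1, acc.2 ++ [rec])) ([], [])).2) none (some k)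
    = PySem.List.slice
      (PySem.List.sorted records
        (fun rec => if (PySem.Str.lower (pvGetD rec "industry" "") == industry
            || (pvAdjGet industry).contains (PySem.Str.lower (pvGetD rec "industry" ""))) then (0:Int) else 1) false)
      none (some k)
  have hA : records.foldl
      (fun (acc : List (List (String × String)) × List (List (String × String))) rec =>
        if PySem.Str.lower (pvGetD rec "industry" "") == industry then (acc.1 ++ [rec], acc.2)
        else if (pvAdjGet industry).contains (PySem.Str.lower (pvGetD rec "industry" "")) then (acc.1 ++ [rec], acc.2)
        else (acc.1, acc.2 ++ [rec])) ([], [])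
      = (records.filter (fun rec => PySem.Str.lower (pvGetD rec "industry" "") == industry
            || (pvAdjGet industry).contains (PySem.Str.lower (pvGetD rec "industry" ""))),
         records.filter (fun rec => !(PySem.Str.lower (pvGetD rec "industry" "") == industry
            || (pvAdjGet industry).contains (PySem.Str.lower (pvGetD rec "industry" ""))))) := by
    simpa using foldl_partition
      (fun rec => PySem.Str.lower (pvGetD rec "industry" "") == industry)
      (fun rec => (pvAdjGet industry).contains (PySem.Str.lower (pvGetD rec "industry" "")))
      records [] []
  rw [hA, sorted_binary
      (fun rec => PySem.Str.lower (pvGetD rec "industry" "") == industry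
        || (pvAdjGet industry).contains (PySem.Str.lower (pvGetD rec "industry" ""))) records]
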